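-- pv_equiv track=rewrite | github.com/shaikh47/practise-codes | duplicateWordRemoval.py | duplicacyRemovalWord
-- ===== SOURCE A (Python) =====
-- def duplicacyRemovalWord(arr):
--     hashMap={}
--     for i in arr:
--         if(i not in hashMap.keys()):
--             hashMap[i]=1
--         else:
--             hashMap[i]=hashMap[i]+1
--
--     redundant=[]
--     for i in hashMap:
--         if(hashMap[i]>1):
--             redundant.append(i)
--     return redundant
-- ===== SOURCE B (Python) =====
-- def duplicacyRemovalWord(arr):
--     seen = set()
--     dups = set()
--     for w in arr:
--         if w in seen:
--             dups.add(w)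
--         else:
--             seen.add(w)
--     result = []
--     emitted = set()
--     for w in arr:
--         if w in dups and w not in emitted:
--             emitted.add(w)
--             result.append(w)
--     return result
-- ===== Notes on version B (the rewrite author's own statement) =====
-- stated objective: alternative
-- what changed: Replaces the count dictionary and its dict-iteration output pass with two membership sets (seen/dups) built in one scan, then a second forward scan of the input that emits each duplicate at its first occurrence using an emitted set.
import Mathlib
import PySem

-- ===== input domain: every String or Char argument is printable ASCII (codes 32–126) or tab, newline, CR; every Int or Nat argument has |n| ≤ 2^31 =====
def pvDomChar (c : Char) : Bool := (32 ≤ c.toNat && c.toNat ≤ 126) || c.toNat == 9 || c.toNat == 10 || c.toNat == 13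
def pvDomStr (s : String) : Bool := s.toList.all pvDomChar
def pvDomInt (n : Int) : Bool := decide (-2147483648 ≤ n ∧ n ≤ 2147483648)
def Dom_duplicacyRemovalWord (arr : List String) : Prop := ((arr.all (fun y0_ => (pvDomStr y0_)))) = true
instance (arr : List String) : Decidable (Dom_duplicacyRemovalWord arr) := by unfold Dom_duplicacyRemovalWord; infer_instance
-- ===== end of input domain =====

-- B replaces A's count dictionary (and its dict-iteration output pass) with two
-- membership sets built in one scan plus a second forward scan of the input that
-- emits each duplicate at its first occurrence; same return value.

-- ===== PORT A =====
def duplicacyRemovalWord (arr : List String) : List String :=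
  let hashMap : PySem.Dict String Int :=
    arr.foldl (fun d i =>
      if d.keys.contains i = false then d.insert i 1
      else d.insert i (d.getD i 0 + 1)) PySem.Dict.empty
  hashMap.keys.foldl (fun redundant i =>
    if 1 < hashMap.getD i 0 then redundant ++ [i] else redundant) []

-- ===== PORT B =====
def duplicacyRemovalWord_alt (arr : List String) : List String :=
  let sd : PySem.Set String × PySem.Set String :=
    arr.foldl (fun p w =>
      if PySem.Set.contains p.1 w then (p.1, PySem.Set.add p.2 w)
      else (PySem.Set.add p.1 w, p.2)) (PySem.Set.empty, PySem.Set.empty)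
  let dups := sd.2
  (arr.foldl (fun q w =>
      if PySem.Set.contains dups w && !(PySem.Set.contains q.1 w)
      then (PySem.Set.add q.1 w, q.2 ++ [w])
      else q) ((PySem.Set.empty : PySem.Set String), ([] : List String))).2

-- ===== PRECONDITION & SPEC =====
def Spec_duplicacyRemovalWord (arr : List String) (out : List String) : Prop := out = duplicacyRemovalWord_alt arr
instance (arr : List String) (out : List String) : Decidable (Spec_duplicacyRemovalWord arr out) := by unfold Spec_duplicacyRemovalWord; infer_instance

-- ===== CLAIM (what is proved, stated in full; the proofs are below) =====
def Claim_equal_duplicacyRemovalWord : Prop := ∀ (arr : List String), Dom_duplicacyRemovalWord arr → Spec_duplicacyRemovalWord arr (duplicacyRemovalWord arr)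

-- ===== LEMMAS AND PROOFS =====

-- A's loop body equals the insert-getD-add-one counting step.
lemma stepA_eq :
    (fun (d : PySem.Dict String Int) i =>
      if d.keys.contains i = false then d.insert i 1
      else d.insert i (d.getD i 0 + 1)) =
    (fun (d : PySem.Dict String Int) i => d.insert i (d.getD i 0 + 1)) := by
  funext d i
  by_cases h : i ∈ d.keys
  · simp [h]
  · have hc : d.contains i = false := by
      rw [← Bool.not_eq_true, PySem.Dict.contains_iff_mem_keys]; exact h
    rw [if_pos (by simpa using h), PySem.Dict.getD_of_not_contains d 0 hc]
    norm_num

-- A's result is the first-occurrence dedup filtered by count ≥ 2.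
lemma resultA (arr : List String) :
    duplicacyRemovalWord arr =
      (PySem.List.dedup arr).filter (fun w => decide (2 ≤ arr.count w)) := by
  unfold duplicacyRemovalWord
  simp only [stepA_eq, PySem.Dict.foldl_insert_getD_add_one_eq_counter,
    PySem.Dict.keys_counter, PySem.Dict.getD_counter,
    PySem.List.foldl_append_ite_eq_filter, List.nil_append,
    PySem.List.dedup_eq_ofList]
  apply List.filter_congr
  intro x _
  simp only [decide_eq_decide]
  omega

-- Membership in the dups set built by B's first pass.
lemma mem_dups_fold (l : List String) (s d : PySem.Set String) (x : String) :
    x ∈ (l.foldl (fun p w =>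
        if PySem.Set.contains p.1 w then (p.1, PySem.Set.add p.2 w)
        else (PySem.Set.add p.1 w, p.2)) (s, d)).2 ↔
      x ∈ d ∨ (x ∈ l ∧ (x ∈ s ∨ 2 ≤ l.count x)) := by
  induction l generalizing s d with
  | nil => simp
  | cons w t ih =>
    by_cases hw : w ∈ s
    · have hcw : PySem.Set.contains s w = true := (PySem.Set.contains_iff s w).mpr hw
      simp only [List.foldl_cons, hcw, ih]
      by_cases hxw : x = w
      · subst hxw
        simp [hw]
      · have hwx : w ≠ x := fun h => hxw h.symm
        simp [PySem.Set.mem_add, hxw, hwx]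
    · have hcw : PySem.Set.contains s w = false := by
        rw [← Bool.not_eq_true, PySem.Set.contains_iff]; exact hw
      simp only [List.foldl_cons, hcw, Bool.false_eq_true, if_false, ih]
      by_cases hxw : x = w
      · subst hxw
        have h1 : x ∈ PySem.Set.add s x := (PySem.Set.mem_add s x x).mpr (Or.inr rfl)
        constructor
        · rintro (hd | ⟨ht, _⟩)
          · exact Or.inl hd
          · refine Or.inr ⟨List.mem_cons_self, Or.inr ?_⟩
            rw [List.count_cons_self]
            have : 1 ≤ t.count x := List.one_le_count_iff.mpr ht
            omega
        · rintro (hd | ⟨_, (hs | h2)⟩)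
          · exact Or.inl hd
          · exact (hw hs).elim
          · rw [List.count_cons_self] at h2
            exact Or.inr ⟨List.one_le_count_iff.mp (by omega), Or.inl h1⟩
      · have hwx : ¬ w = x := fun h => hxw h.symm
        simp only [PySem.Set.mem_add, List.mem_cons, hxw, or_false, false_or,
          List.count_cons, if_neg hwx, beq_iff_eq, add_zero]

-- discard is a filter (definitional).
lemma discard_eq_filter (s : PySem.Set String) (w : String) :
    PySem.Set.discard s w = s.filter (fun y => !(y == w)) := rfl

-- Filtering by a predicate false at w ignores discarding w.
lemma filter_discard_of_false (q : String → Bool) (w : String) (hq : q w = false)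
    (s : List String) :
    (PySem.Set.discard s w).filter q = s.filter q := by
  rw [discard_eq_filter, List.filter_filter]
  apply List.filter_congr
  intro x _
  by_cases hxw : x = w
  · subst hxw; simp [hq]
  · simp [hxw]

-- Adding w to the emitted set = discarding w from the remaining candidates.
lemma filter_add_discard (p : String → Bool) (e : PySem.Set String) (w : String)
    (s : List String) :
    s.filter (fun x => p x && !(PySem.Set.contains (PySem.Set.add e w) x)) =
      (PySem.Set.discard s w).filter (fun x => p x && !(PySem.Set.contains e x)) := by
  rw [discard_eq_filter, List.filter_filter]
  apply List.filter_congr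
  intro x _
  by_cases hxw : x = w
  · subst hxw
    have hself : PySem.Set.contains (PySem.Set.add e x) x = true :=
      (PySem.Set.contains_iff _ x).mpr ((PySem.Set.mem_add e x x).mpr (Or.inr rfl))
    simp
  · have hkeep : PySem.Set.contains (PySem.Set.add e w) x = PySem.Set.contains e x := by
      by_cases hx : x ∈ e
      · rw [(PySem.Set.contains_iff _ x).mpr ((PySem.Set.mem_add e w x).mpr (Or.inl hx)),
          (PySem.Set.contains_iff e x).mpr hx]
      · have h1 : PySem.Set.contains e x = false := by
          rw [← Bool.not_eq_true, PySem.Set.contains_iff]; exact hx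
        have h2 : PySem.Set.contains (PySem.Set.add e w) x = false := by
          rw [← Bool.not_eq_true, PySem.Set.contains_iff, PySem.Set.mem_add]
          rintro (h | h)
          · exact hx h
          · exact hxw h
        rw [h1, h2]
    simp [hxw]

-- B's second pass: appended words are the dedup of l filtered by p and not-in-e.
lemma second_pass (p : String → Bool) (l : List String) (e : PySem.Set String)
    (acc : List String) :
    (l.foldl (fun q w =>
        if p w && !(PySem.Set.contains q.1 w)
        then (PySem.Set.add q.1 w, q.2 ++ [w])
        else q) (e, acc)).2 =
      acc ++ (PySem.List.dedup l).filter (fun w => p w && !(PySem.Set.contains e w)) := by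
  induction l generalizing e acc with
  | nil => simp [PySem.List.dedup]
  | cons w t ih =>
    have hdedup : PySem.List.dedup (w :: t) =
        w :: PySem.Set.discard (PySem.List.dedup t) w := by
      simp only [PySem.List.dedup_eq_ofList]
      exact PySem.Set.ofList_cons w t
    rw [hdedup, List.filter_cons, List.foldl_cons]
    by_cases hc : (p w && !(PySem.Set.contains e w)) = true
    · rw [if_pos hc, if_pos hc]
      show (t.foldl _ (PySem.Set.add e w, acc ++ [w])).2 = _
      rw [ih, filter_add_discard]
      simp
    · have hc' : (p w && !(PySem.Set.contains e w)) = false := by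
        revert hc; cases (p w && !(PySem.Set.contains e w)) <;> simp
      rw [if_neg hc, if_neg hc]
      rw [ih, filter_discard_of_false _ _ hc']

-- The dups set of B's first pass tests exactly count ≥ 2.
lemma dups_contains (arr : List String) (x : String) :
    PySem.Set.contains
      ((arr.foldl (fun p w =>
          if PySem.Set.contains p.1 w then (p.1, PySem.Set.add p.2 w)
          else (PySem.Set.add p.1 w, p.2))
        ((PySem.Set.empty : PySem.Set String), (PySem.Set.empty : PySem.Set String))).2) x =
      decide (2 ≤ arr.count x) := by
  by_cases h : 2 ≤ arr.count x
  · have hx : x ∈ arr := List.one_le_count_iff.mp (by omega)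
    rw [(PySem.Set.contains_iff _ x).mpr
      ((mem_dups_fold arr _ _ x).mpr (Or.inr ⟨hx, Or.inr h⟩))]
    simp [h]
  · have hnm : x ∉ (arr.foldl (fun p w =>
          if PySem.Set.contains p.1 w then (p.1, PySem.Set.add p.2 w)
          else (PySem.Set.add p.1 w, p.2))
        ((PySem.Set.empty : PySem.Set String), (PySem.Set.empty : PySem.Set String))).2 := by
      rw [mem_dups_fold]
      rintro (hd | ⟨_, hs | h2⟩)
      · exact List.not_mem_nil hd
      · exact List.not_mem_nil hs
      · exact h h2
    have hcf := (Bool.not_eq_true _).mp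
      (fun hc => hnm ((PySem.Set.contains_iff _ x).mp hc))
    rw [hcf]
    simp [h]

lemma resultB (arr : List String) :
    duplicacyRemovalWord_alt arr =
      (PySem.List.dedup arr).filter (fun w => decide (2 ≤ arr.count w)) := by
  unfold duplicacyRemovalWord_alt
  rw [second_pass]
  simp only [List.nil_append]
  apply List.filter_congr
  intro x _
  rw [dups_contains]
  have he : PySem.Set.contains (PySem.Set.empty : PySem.Set String) x = false := rfl
  rw [he]
  simp

-- ===== VERDICT (by name: the statement is the Claim_ definition above) =====
theorem duplicacyRemovalWord_spec : Claim_equal_duplicacyRemovalWord := by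
  intro arr _
  unfold Spec_duplicacyRemovalWord
  rw [resultA, resultB]
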